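-- pv_equiv track=rewrite | github.com/Quteraz/da_opt_obl2 | find_opt_solution.py | fit_calc
-- ===== SOURCE A (Python) =====
-- def fit_calc(data, solution):
-- 	fit = 0
-- 	# index = node, el = list
-- 	for index, el in enumerate(data):
-- 		# node = node, val = bool
-- 		for node, val in enumerate(el):
-- 			# symmetry break
-- 			if index == node:
-- 				break
-- 			# count fit conditions
-- 			if val == 'True' and solution[index] == solution[node]:
-- 				fit += 1
-- 	return fit
-- ===== SOURCE B (Python) =====
-- def fit_calc(data, solution):
--     # Group earlier node indices by their solution value so the inner pass only
--     # visits same-group nodes instead of testing solution equality pairwise.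
--     prev = {}
--     fit = 0
--     for b, (row, v) in enumerate(zip(data, solution)):
--         for a in prev.get(v, []):
--             if a < len(row) and row[a] == 'True':
--                 fit += 1
--         prev.setdefault(v, []).append(b)
--     return fit
-- ===== Notes on version B (the rewrite author's own statement) =====
-- stated objective: alternative
-- what changed: B replaces A's full lower-triangle scan with a per-pair solution-equality test by a dict that groups earlier node indices by solution value, so each row only checks adjacency against its own group's predecessors.
import Mathlib
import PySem

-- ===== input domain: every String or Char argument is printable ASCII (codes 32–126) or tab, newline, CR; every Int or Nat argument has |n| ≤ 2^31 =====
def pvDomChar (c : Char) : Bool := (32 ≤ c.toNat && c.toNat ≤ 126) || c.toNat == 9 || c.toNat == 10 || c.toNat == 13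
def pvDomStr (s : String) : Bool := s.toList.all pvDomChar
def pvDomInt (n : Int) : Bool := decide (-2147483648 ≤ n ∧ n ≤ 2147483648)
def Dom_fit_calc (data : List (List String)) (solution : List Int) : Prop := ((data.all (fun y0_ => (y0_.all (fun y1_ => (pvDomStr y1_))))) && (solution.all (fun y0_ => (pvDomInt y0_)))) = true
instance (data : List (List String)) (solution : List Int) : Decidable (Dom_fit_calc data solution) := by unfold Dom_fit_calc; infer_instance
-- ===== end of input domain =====

-- B replaces A's full lower-triangle scan (with a solution-equality test on every pair) by a dict
-- grouping earlier node indices by solution value, so each row only visits same-group predecessors;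
-- equal return value proved on Pre_ (objective: alternative data structure, not claimed faster).

-- ===== PORT A =====
-- inner 'for node, val in enumerate(el)' loop with its 'break' at node == index
def fitInnerA (solution : List Int) (index : Int) : List String → Int → Int → Int
  | [], _, fit => fit
  | v :: rest, node, fit =>
    if index == node then fit
    else if v == "True" && (PySem.List.pyGetD solution index 0 == PySem.List.pyGetD solution node 0) then
      fitInnerA solution index rest (node + 1) (fit + 1)
    else
      fitInnerA solution index rest (node + 1) fit
-- NOTE solution[index]/solution[node]: ported with pyGetD (default 0); Pre_fit_calc excludes exactly
-- the inputs where Python's solution[index] would raise IndexError, so the default is never reached.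

def fit_calc (data : List (List String)) (solution : List Int) : Int :=
  (PySem.List.enumerate data).foldl (fun fit p => fitInnerA solution p.1 p.2 0 fit) 0

-- ===== PORT B =====
-- one step of B's loop body: count hits against prev[v], then prev.setdefault(v, []).append(b)
def stepB (st : PySem.Dict Int (List Int) × Int) (p : Int × (List String × Int)) :
    PySem.Dict Int (List Int) × Int :=
  let prevs := st.1.getD p.2.2 []
  (st.1.insert p.2.2 (prevs ++ [p.1]),
   prevs.foldl
     (fun f a =>
       if decide (a < ((p.2.1).length : Int)) && (PySem.List.pyGetD p.2.1 a "" == "True") then f + 1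
       else f)
     st.2)

def fit_calc_alt (data : List (List String)) (solution : List Int) : Int :=
  ((PySem.List.enumerate (List.zip data solution)).foldl stepB (PySem.Dict.empty, 0)).2

-- ===== PRECONDITION & SPEC =====
-- Pre_ excludes exactly the inputs where A raises IndexError: a 'True' entry in the scanned lower
-- triangle of a row whose index is out of range of `solution`.
def Pre_fit_calc (data : List (List String)) (solution : List Int) : Prop :=
  ∀ b, b < data.length → ∀ a, a < min b (data.getD b []).length →
    (data.getD b []).getD a "" = "True" → b < solution.length
instance (data : List (List String)) (solution : List Int) : Decidable (Pre_fit_calc data solution) := by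
  unfold Pre_fit_calc; infer_instance

def pvWitness_fit_calc : List (List String) × List Int :=
  ([["False"], ["True", "x"], ["False", "True"]], [1, 1, 2])

def Spec_fit_calc (data : List (List String)) (solution : List Int) (out : Int) : Prop := out = fit_calc_alt data solution
instance (data : List (List String)) (solution : List Int) (out : Int) : Decidable (Spec_fit_calc data solution out) := by unfold Spec_fit_calc; infer_instance

-- ===== CLAIM (what is proved, stated in full; the proofs are below) =====
def Claim_equal_fit_calc : Prop := ∀ (data : List (List String)) (solution : List Int), Dom_fit_calc data solution → Pre_fit_calc data solution → Spec_fit_calc data solution (fit_calc data solution)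

-- ===== LEMMAS AND PROOFS =====

-- the per-row count both programs compute, phrased over Nat indices with getD
def rowHits (row : List String) (a : Nat) : Bool := decide (a < row.length) && (row.getD a "" == "True")

def cA (data : List (List String)) (sol : List Int) (b : Nat) : Int :=
  (((List.range (min b (data.getD b []).length)).countP
      (fun a => ((data.getD b []).getD a "" == "True")
        && (PySem.List.pyGetD sol (b : Int) 0 == PySem.List.pyGetD sol (a : Int) 0)) : Nat) : Int)

def cB (data : List (List String)) (sol : List Int) (b : Nat) : Int :=
  ((((List.range b).filter (fun i => sol.getD i 0 == sol.getD b 0)).countP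
      (fun a => rowHits (data.getD b []) a) : Nat) : Int)

lemma enumerate_eq {α : Type} (l : List α) (d : α) :
    ∀ s : Int, PySem.List.enumerate l s
      = (List.range l.length).map (fun (i : Nat) => (s + (i : Int), l.getD i d)) := by
  induction l with
  | nil => intro s; simp [PySem.List.enumerate]
  | cons x t ih =>
    intro s
    simp only [PySem.List.enumerate, ih (s + 1), List.length_cons, List.range_succ_eq_map,
      List.map_cons, List.map_map]
    refine congrArg₂ _ (by simp) ?_
    apply List.map_congr_left
    intro i _
    simp [Function.comp]
    omega

lemma innerA_eq (sol : List Int) (bn : Nat) :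
    ∀ (el : List String) (node : Nat) (fit : Int), node ≤ bn →
      fitInnerA sol (bn : Int) el (node : Int) fit
        = fit + (((List.range' node (min (bn - node) el.length)).countP
            (fun a => (el.getD (a - node) "" == "True")
              && (PySem.List.pyGetD sol (bn : Int) 0 == PySem.List.pyGetD sol (a : Int) 0)) : Nat) : Int) := by
  intro el
  induction el with
  | nil => intro node fit _; simp [fitInnerA]
  | cons v rest ih =>
    intro node fit hle
    by_cases heq : node = bn
    · subst heq
      simp [fitInnerA]
    · have hlt : node < bn := lt_of_le_of_ne hle heq
      have hne : ((bn : Int) == (node : Int)) = false := by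
        simp; omega
      have hsub : min (bn - node) (v :: rest).length = min (bn - (node + 1)) rest.length + 1 := by
        simp [List.length_cons]; omega
      have hrange : List.range' node (min (bn - (node + 1)) rest.length + 1)
          = node :: List.range' (node + 1) (min (bn - (node + 1)) rest.length) := by
        simp [List.range'_succ]
      have hcast : ((node : Int) + 1) = (((node + 1 : Nat)) : Int) := by push_cast; ring
      have htail : (List.range' (node + 1) (min (bn - (node + 1)) rest.length)).countP
            (fun a => ((v :: rest).getD (a - node) "" == "True")
              && (PySem.List.pyGetD sol (bn : Int) 0 == PySem.List.pyGetD sol (a : Int) 0))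
          = (List.range' (node + 1) (min (bn - (node + 1)) rest.length)).countP
            (fun a => (rest.getD (a - (node + 1)) "" == "True")
              && (PySem.List.pyGetD sol (bn : Int) 0 == PySem.List.pyGetD sol (a : Int) 0)) := by
        apply List.countP_congr
        intro a ha
        have : node + 1 ≤ a := (List.mem_range'_1.mp ha).1
        have : a - node = (a - (node + 1)) + 1 := by omega
        simp [this]
      rw [fitInnerA, hne]
      simp only [Bool.false_eq_true, if_false, hsub, hrange]
      rw [List.countP_cons]
      simp only [Nat.sub_self, List.getD_cons_zero]
      by_cases hc : (v == "True" && (PySem.List.pyGetD sol (bn : Int) 0 == PySem.List.pyGetD sol (node : Int) 0)) = true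
      · rw [if_pos hc, hcast, ih (node + 1) (fit + 1) (by omega), htail, hc]
        simp
        ring
      · rw [if_neg hc, hcast, ih (node + 1) fit (by omega), htail]
        rw [Bool.not_eq_true] at hc
        rw [hc]
        simp

lemma beq_swap (x y : Int) : (x == y) = (y == x) := by
  rw [Bool.eq_iff_iff]
  simp only [beq_iff_eq]
  exact eq_comm

lemma fit_calc_eq_sum (data : List (List String)) (sol : List Int) :
    fit_calc data sol = ((List.range data.length).map (cA data sol)).sum := by
  unfold fit_calc
  rw [enumerate_eq data [] 0, List.foldl_map,
    PySem.List.foldl_congr_mem _ _ (fun fit i => fit + cA data sol i) _ ?_,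
    PySem.List.foldl_add, zero_add]
  intro fit i _
  have h := innerA_eq sol i (data.getD i []) 0 fit (Nat.zero_le i)
  simp only [Nat.cast_zero, Nat.sub_zero, ← List.range_eq_range'] at h
  simp only [zero_add]
  rw [h, cA]

lemma foldB_invariant (data : List (List String)) (sol : List Int) (m : Nat) :
    (∀ v : Int,
      (((List.range m).map (fun (i : Nat) => ((i : Int), (data.getD i [], sol.getD i 0)))).foldl stepB
        (PySem.Dict.empty, 0)).1.getD v []
      = ((List.range m).filter (fun i => sol.getD i 0 == v)).map (fun (i : Nat) => (i : Int)))
    ∧ (((List.range m).map (fun (i : Nat) => ((i : Int), (data.getD i [], sol.getD i 0)))).foldl stepB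
        (PySem.Dict.empty, 0)).2
      = ((List.range m).map (cB data sol)).sum := by
  induction m with
  | zero => simp [PySem.Dict.getD_empty]
  | succ m ih =>
    obtain ⟨ih1, ih2⟩ := ih
    rw [List.range_succ]
    simp only [List.map_append, List.map_cons, List.map_nil, List.foldl_append, List.foldl_cons,
      List.foldl_nil]
    have hprev := ih1 (sol.getD m 0)
    constructor
    · intro v
      rw [stepB]
      simp only []
      rw [PySem.Dict.getD_insert, List.filter_append, List.map_append]
      by_cases hv : v = sol.getD m 0
      · subst hv
        rw [if_pos rfl, ih1]
        simp
      · rw [if_neg hv, ih1]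
        have hfm : (sol.getD m 0 == v) = false := by
          rw [beq_eq_false_iff_ne]
          exact fun h => hv h.symm
        rw [List.filter_singleton, hfm]
        simp
    · rw [stepB]
      simp only []
      rw [PySem.List.foldl_if_add_one, ih2, hprev, List.countP_map]
      have hcnt : List.countP
          ((fun a => decide (a < ((data.getD m []).length : Int))
              && (PySem.List.pyGetD (data.getD m []) a "" == "True")) ∘ (fun (i : Nat) => (i : Int)))
          ((List.range m).filter (fun i => sol.getD i 0 == sol.getD m 0))
          = List.countP (fun a => rowHits (data.getD m []) a)
            ((List.range m).filter (fun i => sol.getD i 0 == sol.getD m 0)) := by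
        apply List.countP_congr
        intro a _
        simp [Function.comp, rowHits, PySem.List.pyGetD_natCast]
      rw [hcnt, List.sum_append]
      simp [cB]

lemma fit_calc_alt_eq_sum (data : List (List String)) (sol : List Int) :
    fit_calc_alt data sol
      = ((List.range (min data.length sol.length)).map (cB data sol)).sum := by
  unfold fit_calc_alt
  rw [enumerate_eq (List.zip data sol) ([], (0 : Int)) 0]
  have hmap : (List.range (List.zip data sol).length).map
        (fun (i : Nat) => ((0 : Int) + (i : Int), (List.zip data sol).getD i ([], (0 : Int))))
      = (List.range (min data.length sol.length)).map
        (fun (i : Nat) => ((i : Int), (data.getD i [], sol.getD i 0))) := by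
    rw [List.length_zip]
    apply List.map_congr_left
    intro i hi
    rw [List.mem_range] at hi
    rw [List.getD_eq_getElem _ _ (by rw [List.length_zip]; exact hi), List.getElem_zip,
      List.getD_eq_getElem _ _ (by omega), List.getD_eq_getElem _ _ (by omega)]
    simp
  rw [hmap, (foldB_invariant data sol (min data.length sol.length)).2]

lemma countP_range_guard (b L : Nat) (Q : Nat → Bool) :
    (List.range b).countP (fun a => decide (a < L) && Q a)
      = (List.range (min b L)).countP Q := by
  induction b with
  | zero => simp
  | succ b ih =>
    rw [List.range_succ, List.countP_append, ih, List.countP_singleton]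
    by_cases h : b < L
    · have h1 : min b L = b := by omega
      have h2 : min (b + 1) L = b + 1 := by omega
      rw [h1, h2, List.range_succ, List.countP_append, List.countP_singleton]
      simp [h]
    · have h1 : min (b + 1) L = min b L := by omega
      rw [h1]
      simp [h]

lemma cA_eq_cB (data : List (List String)) (sol : List Int) (b : Nat) :
    cA data sol b = cB data sol b := by
  unfold cA cB
  rw [List.countP_filter]
  have h : List.countP
        (fun a => rowHits (data.getD b []) a && (sol.getD a 0 == sol.getD b 0)) (List.range b)
      = List.countP
        (fun a => decide (a < (data.getD b []).length)
          && (((data.getD b []).getD a "" == "True")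
            && (PySem.List.pyGetD sol (b : Int) 0 == PySem.List.pyGetD sol (a : Int) 0)))
        (List.range b) := by
    apply List.countP_congr
    intro a _
    simp only [rowHits, Bool.and_assoc, PySem.List.pyGetD_natCast]
    rw [beq_swap (sol.getD b 0) (sol.getD a 0)]
  rw [h, countP_range_guard]

lemma cA_tail_zero (data : List (List String)) (sol : List Int)
    (hpre : Pre_fit_calc data sol) (b : Nat) (hb : b < data.length) (hs : sol.length ≤ b) :
    cA data sol b = 0 := by
  unfold cA
  rw [Nat.cast_eq_zero, List.countP_eq_zero]
  intro a ha hp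
  rw [List.mem_range] at ha
  rw [Bool.and_eq_true, beq_iff_eq] at hp
  exact absurd (hpre b hb a ha hp.1) (by omega)

-- ===== VERDICT (by name: the statement is the Claim_ definition above) =====
theorem fit_calc_spec : Claim_equal_fit_calc := by
  intro data sol _ hpre
  unfold Spec_fit_calc
  rw [fit_calc_eq_sum, fit_calc_alt_eq_sum]
  have hmn : min data.length sol.length ≤ data.length := Nat.min_le_left _ _
  conv_lhs => rw [show data.length
      = min data.length sol.length + (data.length - min data.length sol.length) from by omega,
    List.range_add, List.map_append, List.sum_append]
  have htail : (((List.range (data.length - min data.length sol.length)).map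
      (fun x => min data.length sol.length + x)).map (cA data sol)).sum = 0 := by
    apply List.sum_eq_zero
    intro x hx
    rw [List.map_map, List.mem_map] at hx
    obtain ⟨i, hi, rfl⟩ := hx
    rw [List.mem_range] at hi
    show cA data sol (min data.length sol.length + i) = 0
    exact cA_tail_zero data sol hpre _ (by omega) (by omega)
  rw [htail, add_zero]
  apply congrArg List.sum
  apply List.map_congr_left
  intro b _
  exact cA_eq_cB data sol b
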